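-- pv_equiv track=rewrite | github.com/gamedevCloudy/case-converter | caseconverter.py | convert
-- ===== SOURCE A (Python) =====
-- def convert(str, case):
--     st=""
--     for i in str:
--             x = ord(i)
--             if (96<x<123) or (64<x<91) or x==32:
--                 st= st+(i)
--     st=st.split()
--
--     if(case == "camel"):
--         for i in range(len(st)):
--             if i>0:
--                 st[i]=st[i].capitalize()
--             else: st[i]= st[i].lower()
--
--         return "".join(st)
--     elif case == 'snake':
--         for i in range(len(st)):
--             st[i]= st[i].lower()
--
--         return "_".join(st)
--     elif case == 'kebab':
--         for i in range(len(st)):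
--             st[i]= st[i].lower()
--
--         return "-".join(st)
--     elif case == 'pascal':
--         for i in range(len(st)):
--             st[i]= st[i].capitalize()
--
--         return "".join(st)
--     elif case == 'uppercasesnake':
--         for i in range(len(st)):
--             st[i]= st[i].upper()
--
--         return "_".join(st)
-- ===== SOURCE B (Python) =====
-- def convert(str, case):
--     # Single streaming pass: no filtered copy, no word list, no split/join of words.
--     # State: current word index, whether we are inside a word; each kept letter is
--     # transformed and emitted immediately, separators are emitted at word starts.
--     def tr_camel(widx, first, c):
--         return c.lower() if widx == 0 else (c.upper() if first else c.lower())
--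
--     def tr_lower(widx, first, c):
--         return c.lower()
--
--     def tr_upper(widx, first, c):
--         return c.upper()
--
--     def tr_cap(widx, first, c):
--         return c.upper() if first else c.lower()
--
--     table = {"camel": ("", tr_camel), "snake": ("_", tr_lower),
--              "kebab": ("-", tr_lower), "pascal": ("", tr_cap),
--              "uppercasesnake": ("_", tr_upper)}
--     if case not in table:
--         return None
--     sep, tr = table[case]
--     out = []
--     widx = -1          # index of the word currently (or last) being emitted
--     in_word = False
--     for c in str:
--         if ("a" <= c <= "z") or ("A" <= c <= "Z"):
--             if not in_word:
--                 widx += 1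
--                 in_word = True
--                 if widx > 0:
--                     out.append(sep)
--                 out.append(tr(widx, True, c))
--             else:
--                 out.append(tr(widx, False, c))
--         elif c == " ":
--             in_word = False
--         # any other character is dropped without ending the current word
--     return "".join(out)
-- ===== Notes on version B (the rewrite author's own statement) =====
-- stated objective: faster
-- what changed: A materializes a filtered string by repeated concatenation (quadratic), splits it into a word list, mutates that list in a per-case loop and joins it; B is a single streaming pass over the input with O(1) state (word index, in-word flag) that transforms and emits each kept letter immediately and inserts separators at word starts, never building the filtered string or the word list.
import Mathlib
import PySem

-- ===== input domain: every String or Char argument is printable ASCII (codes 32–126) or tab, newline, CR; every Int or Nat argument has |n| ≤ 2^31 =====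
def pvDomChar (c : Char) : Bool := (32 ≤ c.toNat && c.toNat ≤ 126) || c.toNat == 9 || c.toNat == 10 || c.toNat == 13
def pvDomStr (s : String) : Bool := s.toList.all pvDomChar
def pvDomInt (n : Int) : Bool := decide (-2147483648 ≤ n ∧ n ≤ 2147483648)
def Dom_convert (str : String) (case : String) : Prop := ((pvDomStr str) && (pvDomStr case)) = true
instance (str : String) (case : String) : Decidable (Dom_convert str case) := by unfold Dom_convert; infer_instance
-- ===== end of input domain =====

-- B replaces A's filter-by-repeated-concatenation + split + per-case list-mutating loop + join by a
-- single streaming pass with O(1) state that emits each transformed letter and separator immediately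
-- (objective: faster — A's string building is quadratic, B is one linear pass).

-- ===== PORT A =====
-- str.capitalize() on a word: first char uppercased, rest lowercased (exact on ASCII, all A's words contain).
def pyCapitalizeA (w : List Char) : List Char :=
  match w with
  | [] => []
  | c :: rest => PySem.Chars.upperChar c :: PySem.Chars.lower rest

def convert (str : String) («case» : String) : Option String :=
  let st0 : List Char := str.toList.foldl (fun st i =>
    let x := i.toNat
    if (96 < x && x < 123) || (64 < x && x < 91) || x == 32 then st ++ [i] else st) []
  let st : List (List Char) := PySem.Chars.split₀ st0
  if «case» == "camel" then
    let st := (List.range st.length).foldl (fun st i =>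
      if i > 0 then st.set i (pyCapitalizeA (st.getD i []))
      else st.set i (PySem.Chars.lower (st.getD i []))) st
    some (String.ofList (PySem.Chars.join [] st))
  else if «case» == "snake" then
    let st := (List.range st.length).foldl (fun st i =>
      st.set i (PySem.Chars.lower (st.getD i []))) st
    some (String.ofList (PySem.Chars.join ['_'] st))
  else if «case» == "kebab" then
    let st := (List.range st.length).foldl (fun st i =>
      st.set i (PySem.Chars.lower (st.getD i []))) st
    some (String.ofList (PySem.Chars.join ['-'] st))
  else if «case» == "pascal" then
    let st := (List.range st.length).foldl (fun st i =>
      st.set i (pyCapitalizeA (st.getD i []))) st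
    some (String.ofList (PySem.Chars.join [] st))
  else if «case» == "uppercasesnake" then
    let st := (List.range st.length).foldl (fun st i =>
      st.set i (PySem.Chars.upper (st.getD i []))) st
    some (String.ofList (PySem.Chars.join ['_'] st))
  else none

-- ===== PORT B =====
-- Source B's local per-character transforms tr_camel/tr_lower/tr_upper/tr_cap (c.lower()/c.upper() on a
-- single char is lowerChar/upperChar, exact on ASCII).
def trCamel (widx : Int) (first : Bool) (c : Char) : Char :=
  if widx == 0 then PySem.Chars.lowerChar c
  else if first then PySem.Chars.upperChar c else PySem.Chars.lowerChar c

def trLower (_ : Int) (_ : Bool) (c : Char) : Char := PySem.Chars.lowerChar c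

def trUpper (_ : Int) (_ : Bool) (c : Char) : Char := PySem.Chars.upperChar c

def trCap (_ : Int) (first : Bool) (c : Char) : Char :=
  if first then PySem.Chars.upperChar c else PySem.Chars.lowerChar c

-- the body of Source B's single for-loop: state = (emitted output, current word index, in_word flag)
def stepB (sep : List Char) (tr : Int → Bool → Char → Char)
    (s : List Char × Int × Bool) (c : Char) : List Char × Int × Bool :=
  let (out, widx, inw) := s
  if ('a' ≤ c && c ≤ 'z') || ('A' ≤ c && c ≤ 'Z') then
    if !inw then
      let w := widx + 1
      ((if w > 0 then out ++ sep else out) ++ [tr w true c], w, true)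
    else (out ++ [tr widx false c], widx, true)
  else if c == ' ' then (out, widx, false)
  else (out, widx, inw)

def convert_alt (str : String) («case» : String) : Option String :=
  let table : PySem.Dict String (List Char × (Int → Bool → Char → Char)) :=
    ((((PySem.Dict.empty.insert "camel" (([] : List Char), trCamel)).insert
      "snake" (['_'], trLower)).insert
      "kebab" (['-'], trLower)).insert
      "pascal" (([] : List Char), trCap)).insert
      "uppercasesnake" (['_'], trUpper)
  match table.get? «case» with
  | none => none
  | some (sep, tr) =>
    some (String.ofList (str.toList.foldl (stepB sep tr) ([], -1, false)).1)

-- ===== PRECONDITION & SPEC =====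
def Spec_convert (str : String) (case : String) (out : Option String) : Prop := out = convert_alt str case
instance (str : String) (case : String) (out : Option String) : Decidable (Spec_convert str case out) := by unfold Spec_convert; infer_instance

-- ===== CLAIM (what is proved, stated in full; the proofs are below) =====
def Claim_equal_convert : Prop := ∀ (str : String) (case : String), Dom_convert str case → Spec_convert str case (convert str case)

-- ===== LEMMAS AND PROOFS =====

-- kept characters (letters and space) and letters, as B spells the tests
def pvP (c : Char) : Bool := ('a' ≤ c && c ≤ 'z') || ('A' ≤ c && c ≤ 'Z') || c == ' '

def pvL (c : Char) : Bool := ('a' ≤ c && c ≤ 'z') || ('A' ≤ c && c ≤ 'Z')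

-- the characters B's machine emits from the rest of the input, given the current state
def emitB (sep : List Char) (tr : Int → Bool → Char → Char) :
    List Char → Int → Bool → List Char
  | [], _, _ => []
  | c :: ds, widx, inw =>
    if pvL c then
      if !inw then
        (if widx + 1 > 0 then sep else []) ++ [tr (widx + 1) true c] ++ emitB sep tr ds (widx + 1) true
      else tr widx false c :: emitB sep tr ds widx true
    else if c == ' ' then emitB sep tr ds widx false
    else emitB sep tr ds widx inw

-- a whole word transformed, at word index k
def rwW (tr : Int → Bool → Char → Char) (k : Nat) (w : List Char) : List Char :=
  match w with
  | [] => []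
  | c :: r => tr (k : Int) true c :: r.map (tr (k : Int) false)

def itemW (sep : List Char) (tr : Int → Bool → Char → Char) (k : Nat) (w : List Char) : List Char :=
  (if 0 < k then sep else []) ++ rwW tr k w

def outW (sep : List Char) (tr : Int → Bool → Char → Char) : Nat → List (List Char) → List Char
  | _, [] => []
  | k, w :: ws => itemW sep tr k w ++ outW sep tr (k + 1) ws

-- split₀.go without its accumulator
def wdsW (ds : List Char) (cur : List Char) : List (List Char) :=
  PySem.Chars.split₀.go ds cur []

lemma go_acc : ∀ (ds cur : List Char) (acc : List (List Char)),
    PySem.Chars.split₀.go ds cur acc = acc.reverse ++ PySem.Chars.split₀.go ds cur [] := by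
  intro ds
  induction ds with
  | nil =>
      intro cur acc
      rw [PySem.Chars.split₀.go, PySem.Chars.split₀.go]
      by_cases h : cur.isEmpty <;> simp [h]
  | cons c rest ih =>
      intro cur acc
      rw [PySem.Chars.split₀.go]
      conv_rhs => rw [PySem.Chars.split₀.go]
      by_cases hs : PySem.Chars.isspace c
      · by_cases hc : cur.isEmpty
        · simp [hs, hc, ih [] acc]
        · simp only [hs, hc, if_true, if_false, Bool.false_eq_true]
          rw [ih [] (cur.reverse :: acc), ih [] [cur.reverse]]
          simp
      · simp only [hs, Bool.false_eq_true, if_false]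
        rw [ih (c :: cur) acc]

lemma machine_emit (sep : List Char) (tr : Int → Bool → Char → Char) :
    ∀ (cs : List Char) (out : List Char) (widx : Int) (inw : Bool),
      (cs.foldl (stepB sep tr) (out, widx, inw)).1 = out ++ emitB sep tr cs widx inw := by
  intro cs
  induction cs with
  | nil => intro out widx inw; simp [emitB]
  | cons c rest ih =>
      intro out widx inw
      simp only [List.foldl_cons, stepB, emitB]
      by_cases hl : pvL c
      · have hl' : (('a' ≤ c && c ≤ 'z') || ('A' ≤ c && c ≤ 'Z')) = true := hl
        cases inw with
        | false =>
            simp only [hl', if_true, Bool.not_false, hl, ih]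
            by_cases hw : widx + 1 > 0 <;> simp [hw]
        | true => simp [hl', hl, ih]
      · have hl' : (('a' ≤ c && c ≤ 'z') || ('A' ≤ c && c ≤ 'Z')) = false := by
          simpa [pvL] using hl
        by_cases hsp : c == ' ' <;> simp [hl', hl, hsp, ih]

lemma emit_filter (sep : List Char) (tr : Int → Bool → Char → Char) :
    ∀ (cs : List Char) (widx : Int) (inw : Bool),
      emitB sep tr cs widx inw = emitB sep tr (cs.filter pvP) widx inw := by
  intro cs
  induction cs with
  | nil => intro widx inw; rfl
  | cons c rest ih =>
      intro widx inw
      have hpl : pvP c = (pvL c || c == ' ') := by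
        simp [pvP, pvL, Bool.or_assoc]
      by_cases hp : pvP c = true
      · by_cases hl : pvL c = true
        · cases inw <;> simp [emitB, hl, hp, ih]
        · have hl' : pvL c = false := by simpa using hl
          have hsp : (c == ' ') = true := by
            rw [hpl, hl'] at hp; simpa using hp
          simp [emitB, hl', hsp, hp, ih]
      · have hp' : pvP c = false := by simpa using hp
        have hboth : pvL c = false ∧ (c == ' ') = false := by
          rw [hpl] at hp'; simpa [Bool.or_eq_false_iff] using hp'
        simp [emitB, hboth.1, hboth.2, hp', ih]

lemma letter_not_space (c : Char) (h : pvL c = true) : PySem.Chars.isspace c = false := by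
  simp only [pvL, Bool.or_eq_true, Bool.and_eq_true, decide_eq_true_eq, Char.le_def,
    UInt32.le_iff_toNat_le] at h
  simp only [PySem.Chars.isspace, Bool.or_eq_false_iff, Bool.and_eq_false_iff,
    decide_eq_false_iff_not, Char.toNat]
  have h1 : 'a'.val.toNat = 97 := rfl
  have h2 : 'z'.val.toNat = 122 := rfl
  have h3 : 'A'.val.toNat = 65 := rfl
  have h4 : 'Z'.val.toNat = 90 := rfl
  simp only [h1, h2, h3, h4] at h
  omega

lemma rwW_append_single (tr : Int → Bool → Char → Char) (k : Nat) (w : List Char) (c : Char)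
    (hw : w ≠ []) : rwW tr k (w ++ [c]) = rwW tr k w ++ [tr (k : Int) false c] := by
  cases w with
  | nil => exact absurd rfl hw
  | cons a as => simp [rwW]

-- the heart: B's emission from a fresh/open-word state equals the indexed word rendering of split₀'s result
lemma emit_wds (sep : List Char) (tr : Int → Bool → Char → Char) :
    ∀ (ds : List Char), (∀ c ∈ ds, pvP c = true) →
      (∀ k : Nat, outW sep tr k (wdsW ds []) = emitB sep tr ds ((k : Int) - 1) false) ∧
      (∀ (k : Nat) (cur : List Char), cur ≠ [] →
        outW sep tr k (wdsW ds cur) = itemW sep tr k cur.reverse ++ emitB sep tr ds (k : Int) true) := by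
  intro ds
  induction ds with
  | nil =>
      intro _
      constructor
      · intro k
        simp [wdsW, PySem.Chars.split₀.go, outW, emitB]
      · intro k cur hcur
        have hce : cur.isEmpty = false := by simpa using hcur
        simp [wdsW, PySem.Chars.split₀.go, hce, outW, emitB, itemW]
  | cons c rest ih =>
      intro hall
      have hrest : ∀ x ∈ rest, pvP x = true := fun x hx => hall x (List.mem_cons_of_mem _ hx)
      have ihr := ih hrest
      have hpc : pvP c = true := hall c List.mem_cons_self
      by_cases hl : pvL c
      · -- c is a letter
        have hns : PySem.Chars.isspace c = false := letter_not_space c hl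
        constructor
        · intro k
          have hgo : wdsW (c :: rest) [] = wdsW rest [c] := by
            unfold wdsW
            rw [PySem.Chars.split₀.go]
            simp [hns]
          rw [hgo, ihr.2 k [c] (by simp)]
          have hidx : ((k : Int) - 1) + 1 = (k : Int) := by ring
          simp only [emitB, hl, Bool.not_false, if_true, hidx]
          have hpos : ((k : Int) > 0) = (0 < k) := by
            simp [Int.natCast_pos]
          simp only [itemW, rwW, List.reverse_cons, List.reverse_nil, List.nil_append,
            List.map_nil]
          by_cases hk : 0 < k <;> simp [hk]
        · intro k cur hcur
          have hgo : wdsW (c :: rest) cur = wdsW rest (c :: cur) := by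
            unfold wdsW
            rw [PySem.Chars.split₀.go]
            simp [hns]
          rw [hgo, ihr.2 k (c :: cur) (by simp)]
          have : (c :: cur).reverse = cur.reverse ++ [c] := by simp
          rw [this]
          simp only [itemW, rwW_append_single tr k cur.reverse c (by simpa using hcur)]
          simp only [emitB, hl, Bool.not_true, if_true, Bool.false_eq_true, if_false]
          simp [List.append_assoc]
      · -- c is a space (the only non-letter pvP character)
        have hl' : pvL c = false := by simpa using hl
        have hsp : (c == ' ') = true := by
          have : pvP c = (pvL c || c == ' ') := by simp [pvP, pvL, Bool.or_assoc]
          rw [this, hl'] at hpc; simpa using hpc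
        have hceq : c = ' ' := by simpa using hsp
        have hs : PySem.Chars.isspace c = true := by rw [hceq]; decide
        constructor
        · intro k
          have hgo : wdsW (c :: rest) [] = wdsW rest [] := by
            unfold wdsW
            rw [PySem.Chars.split₀.go]
            simp [hs]
          rw [hgo, (ih hrest).1 k]
          simp [emitB, hl', hsp]
        · intro k cur hcur
          have hce : cur.isEmpty = false := by simpa using hcur
          have hgo : wdsW (c :: rest) cur = cur.reverse :: wdsW rest [] := by
            unfold wdsW
            rw [PySem.Chars.split₀.go]
            simp only [hs, if_true, hce, Bool.false_eq_true, if_false]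
            rw [go_acc rest [] [cur.reverse]]
            simp
          rw [hgo]
          have hk1 : ((k + 1 : Nat) : Int) - 1 = (k : Int) := by push_cast; ring
          simp only [outW, emitB, hl', Bool.false_eq_true, if_false, hsp, if_true]
          rw [(ih hrest).1 (k + 1)]
          rw [hk1]

-- join written word-by-word with leading separators
lemma join_flat (sep : List Char) : ∀ (x : List Char) (xs : List (List Char)),
    PySem.Chars.join sep (x :: xs) = x ++ (xs.map (fun y => sep ++ y)).flatten := by
  intro x xs
  induction xs generalizing x with
  | nil => simp [PySem.Chars.join_singleton]
  | cons y ys ih =>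
      rw [PySem.Chars.join_cons_cons, ih y]
      simp [List.append_assoc]

lemma outW_pos (sep : List Char) (tr : Int → Bool → Char → Char) :
    ∀ (ws : List (List Char)) (k : Nat),
      outW sep tr (k + 1) ws
        = (((List.range' (k + 1) ws.length).zip ws).map (fun p => sep ++ rwW tr p.1 p.2)).flatten := by
  intro ws
  induction ws with
  | nil => intro k; simp [outW]
  | cons w t ih =>
      intro k
      rw [List.length_cons, List.range'_succ, List.zip_cons_cons, List.map_cons,
        List.flatten_cons]
      simp only [outW, itemW, Nat.zero_lt_succ, if_pos]
      rw [ih (k + 1)]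

lemma join_outW (sep : List Char) (tr : Int → Bool → Char → Char)
    (g : Nat → List Char → List Char) (hg : ∀ k w, g k w = rwW tr k w) :
    ∀ (ws : List (List Char)),
      PySem.Chars.join sep (((List.range ws.length).zip ws).map (fun p => g p.1 p.2))
        = outW sep tr 0 ws := by
  intro ws
  cases ws with
  | nil => simp [outW, PySem.Chars.join_nil]
  | cons w t =>
      have hr : List.range (w :: t).length = 0 :: List.range' 1 t.length := by
        rw [List.range_eq_range', List.length_cons, List.range'_succ]
      rw [hr, List.zip_cons_cons, List.map_cons, join_flat, hg 0 w]
      simp only [outW, itemW, lt_irrefl, if_false]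
      rw [outW_pos sep tr t 0]
      congr 1
      rw [List.map_map]
      exact congrArg List.flatten (List.map_congr_left fun p _ => by simp [hg p.1 p.2])

-- per-case word transforms agree with the streaming per-character transforms
lemma lower_rw (k : Nat) (w : List Char) : PySem.Chars.lower w = rwW trLower k w := by
  cases w <;> simp [PySem.Chars.lower, rwW, trLower]

lemma upper_rw (k : Nat) (w : List Char) : PySem.Chars.upper w = rwW trUpper k w := by
  cases w <;> simp [PySem.Chars.upper, rwW, trUpper]

lemma cap_rw (k : Nat) (w : List Char) : pyCapitalizeA w = rwW trCap k w := by
  cases w <;> simp [pyCapitalizeA, rwW, trCap, PySem.Chars.lower]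

lemma camel_rw (k : Nat) (w : List Char) :
    (if k > 0 then pyCapitalizeA w else PySem.Chars.lower w) = rwW trCamel k w := by
  cases k with
  | zero => cases w <;> simp [rwW, trCamel, PySem.Chars.lower]
  | succ n =>
      have hz : ¬ ((n : Int) + 1 = 0) := by omega
      cases w <;> simp [rwW, trCamel, pyCapitalizeA, hz, PySem.Chars.lower]

-- A's character predicate equals B's
lemma pred_eq (c : Char) :
    ((96 < c.toNat && c.toNat < 123) || (64 < c.toNat && c.toNat < 91) || c.toNat == 32)
    = pvP c := by
  have h1 : 'a'.val.toNat = 97 := rfl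
  have h2 : 'z'.val.toNat = 122 := rfl
  have h3 : 'A'.val.toNat = 65 := rfl
  have h4 : 'Z'.val.toNat = 90 := rfl
  have h5 : ' '.val.toNat = 32 := rfl
  rw [Bool.eq_iff_iff]
  simp only [pvP, Bool.or_eq_true, Bool.and_eq_true, decide_eq_true_eq, beq_iff_eq, Char.le_def,
    Char.toNat, UInt32.le_iff_toNat_le, Char.ext_iff, UInt32.ext_iff]
  omega

-- A's append-accumulator loop is a filter
lemma foldl_filter_eq (p : Char → Bool) :
    ∀ (l acc : List Char),
      l.foldl (fun st i => if p i then st ++ [i] else st) acc = acc ++ l.filter p := by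
  intro l
  induction l with
  | nil => simp
  | cons a t ih =>
      intro acc
      by_cases h : p a = true <;> simp [h, ih]

-- A's filtered string is the pvP-filter of the input
lemma words_eq (str : String) :
    (str.toList.foldl (fun st i =>
      let x := i.toNat
      if (96 < x && x < 123) || (64 < x && x < 91) || x == 32 then st ++ [i] else st) [])
    = str.toList.filter pvP := by
  have h := foldl_filter_eq (fun i : Char =>
    (96 < i.toNat && i.toNat < 123) || (64 < i.toNat && i.toNat < 91) || i.toNat == 32)
    str.toList []
  rw [h, List.nil_append]
  exact List.filter_congr (fun c _ => pred_eq c)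

-- A's index-mutating range loop is a map over zip with indices
lemma foldl_set_range' {α : Type} (f : Nat → α → α) (d : α) :
    ∀ (xs pre : List α),
      (List.range' pre.length xs.length).foldl
        (fun acc i => acc.set i (f i (acc.getD i d))) (pre ++ xs)
      = pre ++ ((List.range' pre.length xs.length).zip xs).map (fun p => f p.1 p.2) := by
  intro xs
  induction xs with
  | nil => simp
  | cons a t ih =>
      intro pre
      have hget : (pre ++ a :: t).getD pre.length d = a := by
        simp [List.getD_eq_getElem?_getD]
      have hset : (pre ++ a :: t).set pre.length (f pre.length a)
          = (pre ++ [f pre.length a]) ++ t := by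
        simp [List.append_assoc]
      have := ih (pre ++ [f pre.length a])
      simp only [List.length_append, List.length_cons] at this ⊢
      rw [List.range'_succ, List.foldl_cons, hget, hset]
      simpa [List.append_assoc] using this

lemma foldl_set_range {α : Type} (f : Nat → α → α) (d : α) (xs : List α) :
    (List.range xs.length).foldl (fun acc i => acc.set i (f i (acc.getD i d))) xs
    = ((List.range xs.length).zip xs).map (fun p => f p.1 p.2) := by
  simpa [List.range_eq_range'] using foldl_set_range' f d xs []

-- the whole A pipeline for one case equals the whole B pipeline for one case
lemma bridge (sep : List Char) (tr : Int → Bool → Char → Char)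
    (g : Nat → List Char → List Char) (hg : ∀ k w, g k w = rwW tr k w) (cs : List Char) :
    PySem.Chars.join sep
        (((List.range (PySem.Chars.split₀ (cs.filter pvP)).length).zip
            (PySem.Chars.split₀ (cs.filter pvP))).map (fun p => g p.1 p.2))
      = (cs.foldl (stepB sep tr) ([], -1, false)).1 := by
  have hall : ∀ c ∈ cs.filter pvP, pvP c = true := fun c hc => List.of_mem_filter hc
  rw [join_outW sep tr g hg]
  have hw : PySem.Chars.split₀ (cs.filter pvP) = wdsW (cs.filter pvP) [] := rfl
  rw [hw, (emit_wds sep tr (cs.filter pvP) hall).1 0]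
  rw [machine_emit sep tr cs [] (-1) false, List.nil_append]
  rw [emit_filter sep tr cs (-1) false]
  norm_num

-- ===== VERDICT (by name: the statement is the Claim_ definition above) =====
theorem convert_spec : Claim_equal_convert := by
  intro str «case» _
  unfold Spec_convert
  by_cases h1 : «case» = "camel"
  · subst h1
    simp only [convert, convert_alt]
    rw [PySem.Dict.get?_insert_of_ne _ _ (by decide),
        PySem.Dict.get?_insert_of_ne _ _ (by decide),
        PySem.Dict.get?_insert_of_ne _ _ (by decide),
        PySem.Dict.get?_insert_of_ne _ _ (by decide),
        PySem.Dict.get?_insert_self]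
    simp only [beq_self_eq_true, if_true, words_eq]
    rw [show (fun (st : List (List Char)) (i : Nat) =>
          if i > 0 then st.set i (pyCapitalizeA (st.getD i []))
          else st.set i (PySem.Chars.lower (st.getD i [])))
        = (fun acc i => acc.set i ((fun (i : Nat) w =>
            if i > 0 then pyCapitalizeA w else PySem.Chars.lower w) i (acc.getD i []))) by
      funext acc i; by_cases h : i > 0 <;> simp [h]]
    rw [foldl_set_range (fun (i : Nat) w =>
          if i > 0 then pyCapitalizeA w else PySem.Chars.lower w) ([] : List Char)]
    rw [bridge [] trCamel _ camel_rw str.toList]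
  · by_cases h2 : «case» = "snake"
    · subst h2
      simp only [convert, convert_alt]
      rw [PySem.Dict.get?_insert_of_ne _ _ (by decide),
          PySem.Dict.get?_insert_of_ne _ _ (by decide),
          PySem.Dict.get?_insert_of_ne _ _ (by decide),
          PySem.Dict.get?_insert_self]
      have hb : (("snake" : String) == "camel") = false := rfl
      simp only [hb, Bool.false_eq_true, if_false, beq_self_eq_true, if_true, words_eq]
      rw [foldl_set_range (fun (_ : Nat) w => PySem.Chars.lower w) ([] : List Char)]
      rw [bridge ['_'] trLower _ lower_rw str.toList]
    · by_cases h3 : «case» = "kebab"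
      · subst h3
        simp only [convert, convert_alt]
        rw [PySem.Dict.get?_insert_of_ne _ _ (by decide),
            PySem.Dict.get?_insert_of_ne _ _ (by decide),
            PySem.Dict.get?_insert_self]
        have hb1 : (("kebab" : String) == "camel") = false := rfl
        have hb2 : (("kebab" : String) == "snake") = false := rfl
        simp only [hb1, hb2, Bool.false_eq_true, if_false, beq_self_eq_true, if_true, words_eq]
        rw [foldl_set_range (fun (_ : Nat) w => PySem.Chars.lower w) ([] : List Char)]
        rw [bridge ['-'] trLower _ lower_rw str.toList]
      · by_cases h4 : «case» = "pascal"
        · subst h4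
          simp only [convert, convert_alt]
          rw [PySem.Dict.get?_insert_of_ne _ _ (by decide),
              PySem.Dict.get?_insert_self]
          have hb1 : (("pascal" : String) == "camel") = false := rfl
          have hb2 : (("pascal" : String) == "snake") = false := rfl
          have hb3 : (("pascal" : String) == "kebab") = false := rfl
          simp only [hb1, hb2, hb3, Bool.false_eq_true, if_false, beq_self_eq_true, if_true,
            words_eq]
          rw [foldl_set_range (fun (_ : Nat) w => pyCapitalizeA w) ([] : List Char)]
          rw [bridge [] trCap _ cap_rw str.toList]
        · by_cases h5 : «case» = "uppercasesnake"
          · subst h5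
            simp only [convert, convert_alt]
            rw [PySem.Dict.get?_insert_self]
            have hb1 : (("uppercasesnake" : String) == "camel") = false := rfl
            have hb2 : (("uppercasesnake" : String) == "snake") = false := rfl
            have hb3 : (("uppercasesnake" : String) == "kebab") = false := rfl
            have hb4 : (("uppercasesnake" : String) == "pascal") = false := rfl
            simp only [hb1, hb2, hb3, hb4, Bool.false_eq_true, if_false, beq_self_eq_true,
              if_true, words_eq]
            rw [foldl_set_range (fun (_ : Nat) w => PySem.Chars.upper w) ([] : List Char)]
            rw [bridge ['_'] trUpper _ upper_rw str.toList]
          · simp only [convert, convert_alt]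
            rw [PySem.Dict.get?_insert_of_ne _ _ h5, PySem.Dict.get?_insert_of_ne _ _ h4,
                PySem.Dict.get?_insert_of_ne _ _ h3, PySem.Dict.get?_insert_of_ne _ _ h2,
                PySem.Dict.get?_insert_of_ne _ _ h1, PySem.Dict.get?_empty]
            simp [h1, h2, h3, h4, h5]
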